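-- pv_equiv track=rewrite | github.com/YooHyeonJun/S2E_Analysis_env | scripts/analyze_network_branches.py | executed_probe_set
-- ===== SOURCE A (Python) =====
-- from typing import Dict, Iterable, List, Optional, Set, Tuple
--
-- def in_ranges(addr: int, ranges: Iterable[Tuple[int, int, int]]) -> bool:
--     for s, e, _ in ranges:
--         if s <= addr <= e:
--             return True
--     return False
--
-- def candidate_addrs(addr: int, runtime_base: int, base_guess: int) -> Set[int]:
--     out = {addr}
--     if addr >= base_guess:
--         rva = addr - base_guess
--         out.add(rva)
--         out.add(runtime_base + rva)
--     else:
--         out.add(runtime_base + addr)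
--         out.add(base_guess + addr)
--     return out
--
-- def executed_probe_set(
--     probes: List[int], ranges: List[Tuple[int, int, int]], runtime_base: int, base_guess: int
-- ) -> Set[int]:
--     out = set()
--     for a in probes:
--         for c in candidate_addrs(a, runtime_base, base_guess):
--             if in_ranges(c, ranges):
--                 out.add(a)
--                 break
--     return out
-- ===== SOURCE B (Python) =====
-- def executed_probe_set(probes, ranges, runtime_base, base_guess):
--     # Merge ranges into disjoint sorted intervals once, then binary-search each candidate.
--     merged = []
--     for s, e, _ in sorted(ranges, key=lambda r: r[0]):
--         if merged and s <= merged[-1][1]: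
--             if e > merged[-1][1]:
--                 merged[-1] = (merged[-1][0], e)
--         else:
--             merged.append((s, e))
--     starts = [p[0] for p in merged]
--     ends = [p[1] for p in merged]
--     n = len(merged)
--
--     def hit(x):
--         lo, hi = 0, n
--         while lo < hi:
--             mid = (lo + hi) // 2
--             if starts[mid] <= x:
--                 lo = mid + 1
--             else:
--                 hi = mid
--         return lo > 0 and x <= ends[lo - 1]
--
--     out = set()
--     for a in probes:
--         if a >= base_guess:
--             rva = a - base_guess
--             c1, c2, c3 = a, rva, runtime_base + rva
--         else:
--             c1, c2, c3 = a, runtime_base + a, base_guess + a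
--         if hit(c1) or hit(c2) or hit(c3):
--             out.add(a)
--     return out
-- ===== Notes on version B (the rewrite author's own statement) =====
-- stated objective: faster
-- what changed: Instead of linearly scanning the full range list for every candidate address of every probe, B sorts the ranges once, merges them into disjoint intervals, and answers each candidate membership query by binary search.
import Mathlib
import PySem

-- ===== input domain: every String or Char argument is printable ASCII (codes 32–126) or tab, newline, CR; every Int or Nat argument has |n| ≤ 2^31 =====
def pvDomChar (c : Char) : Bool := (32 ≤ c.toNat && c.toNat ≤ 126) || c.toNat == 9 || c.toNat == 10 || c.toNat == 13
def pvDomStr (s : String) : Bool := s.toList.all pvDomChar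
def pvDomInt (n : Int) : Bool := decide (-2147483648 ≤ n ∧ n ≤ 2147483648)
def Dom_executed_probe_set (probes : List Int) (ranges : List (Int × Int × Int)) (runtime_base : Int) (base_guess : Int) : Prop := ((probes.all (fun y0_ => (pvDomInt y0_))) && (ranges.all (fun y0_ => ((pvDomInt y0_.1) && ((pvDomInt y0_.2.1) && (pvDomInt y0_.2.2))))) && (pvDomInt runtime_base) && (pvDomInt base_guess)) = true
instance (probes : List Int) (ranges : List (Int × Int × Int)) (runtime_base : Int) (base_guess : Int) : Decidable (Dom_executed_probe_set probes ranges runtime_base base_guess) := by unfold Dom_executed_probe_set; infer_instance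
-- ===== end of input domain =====

-- B replaces A's per-candidate linear scan of the ranges by a one-time sort-and-merge
-- of the ranges into disjoint intervals plus a binary search per candidate (objective: faster).

-- ===== PORT A =====
-- for s, e, _ in ranges: if s <= addr <= e: return True; return False
def in_ranges (addr : Int) : List (Int × Int × Int) → Bool
  | [] => false
  | (s, e, _) :: rest => if s ≤ addr ∧ addr ≤ e then true else in_ranges addr rest

-- candidate_addrs builds the Python set {addr, ...}; ported as PySem.Set in insertion order.
def candidate_addrs (addr : Int) (runtime_base : Int) (base_guess : Int) : PySem.Set Int :=
  let out : PySem.Set Int := PySem.Set.ofList [addr]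
  if addr ≥ base_guess then
    let rva := addr - base_guess
    PySem.Set.add (PySem.Set.add out rva) (runtime_base + rva)
  else
    PySem.Set.add (PySem.Set.add out (runtime_base + addr)) (base_guess + addr)

-- inner 'for c in candidate_addrs(...): if in_ranges(c, ranges): out.add(a); break'
-- (iterated in the Set's insertion order; the result — whether a gets added — does not
--  depend on the iteration order, so this is exact w.r.t. Python's hash order)
def probe_inner (a : Int) (ranges : List (Int × Int × Int)) (out : PySem.Set Int) : List Int → PySem.Set Int
  | [] => out
  | c :: rest => if in_ranges c ranges then PySem.Set.add out a else probe_inner a ranges out rest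

def executed_probe_set (probes : List Int) (ranges : List (Int × Int × Int)) (runtime_base : Int) (base_guess : Int) : List Int :=
  probes.foldl (fun out a => probe_inner a ranges out (candidate_addrs a runtime_base base_guess)) []

-- ===== PORT B =====
-- one step of B's merge loop; the Python appends at the tail, the port conses at the
-- head and reverses at the end (the head is Python's merged[-1])
def mergeStep (acc : List (Int × Int)) (r : Int × Int × Int) : List (Int × Int) :=
  match acc with
  | [] => [(r.1, r.2.1)]
  | (ms, me) :: rest =>
    if r.1 ≤ me then
      (if me < r.2.1 then (ms, r.2.1) :: rest else (ms, me) :: rest)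
    else (r.1, r.2.1) :: (ms, me) :: rest

def mergeRanges (ranges : List (Int × Int × Int)) : List (Int × Int) :=
  ((PySem.List.sorted ranges (fun r => r.1) false).foldl mergeStep []).reverse

-- B's hand-written binary-search loop: 'while lo < hi: ...'
def bsLoop (starts : List Int) (x : Int) (lo hi : Nat) : Nat :=
  if lo < hi then
    if starts.getD ((lo + hi) / 2) 0 ≤ x then bsLoop starts x ((lo + hi) / 2 + 1) hi
    else bsLoop starts x lo ((lo + hi) / 2)
  else lo
termination_by hi - lo
decreasing_by all_goals omega

-- B's hit(x): lo > 0 and x <= ends[lo-1]  (index lo-1 is always in range, so getD's default is dead)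
def hitMerged (merged : List (Int × Int)) (x : Int) : Bool :=
  let i := bsLoop (merged.map Prod.fst) x 0 merged.length
  decide (0 < i) && decide (x ≤ (merged.map Prod.snd).getD (i - 1) 0)

def executed_probe_set_alt (probes : List Int) (ranges : List (Int × Int × Int)) (runtime_base : Int) (base_guess : Int) : List Int :=
  let merged := mergeRanges ranges
  probes.foldl (fun out a =>
    let cs : Int × Int × Int :=
      if a ≥ base_guess then (a, a - base_guess, runtime_base + (a - base_guess))
      else (a, runtime_base + a, base_guess + a)
    if hitMerged merged cs.1 || hitMerged merged cs.2.1 || hitMerged merged cs.2.2 then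
      PySem.Set.add out a
    else out) []

-- ===== PRECONDITION & SPEC =====
def Spec_executed_probe_set (probes : List Int) (ranges : List (Int × Int × Int)) (runtime_base : Int) (base_guess : Int) (out : List Int) : Prop := out = executed_probe_set_alt probes ranges runtime_base base_guess
instance (probes : List Int) (ranges : List (Int × Int × Int)) (runtime_base : Int) (base_guess : Int) (out : List Int) : Decidable (Spec_executed_probe_set probes ranges runtime_base base_guess out) := by unfold Spec_executed_probe_set; infer_instance

-- ===== CLAIM (what is proved, stated in full; the proofs are below) =====
def Claim_equal_executed_probe_set : Prop := ∀ (probes : List Int) (ranges : List (Int × Int × Int)) (runtime_base : Int) (base_guess : Int), Dom_executed_probe_set probes ranges runtime_base base_guess → Spec_executed_probe_set probes ranges runtime_base base_guess (executed_probe_set probes ranges runtime_base base_guess)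

-- ===== LEMMAS AND PROOFS =====

-- coverage of a list of closed intervals
def covP (l : List (Int × Int)) (x : Int) : Prop := ∃ p ∈ l, p.1 ≤ x ∧ x ≤ p.2

-- invariant relation on the reversed accumulator of the merge loop: the newer interval
-- starts strictly after the older one ends, and starts do not decrease
def RP (a b : Int × Int) : Prop := b.2 < a.1 ∧ b.1 ≤ a.1

lemma covP_cons (q : Int × Int) (l : List (Int × Int)) (x : Int) :
    covP (q :: l) x ↔ (q.1 ≤ x ∧ x ≤ q.2) ∨ covP l x := by
  simp only [covP, List.mem_cons]
  constructor
  · rintro ⟨p, (rfl | hp), h⟩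
    · exact Or.inl h
    · exact Or.inr ⟨p, hp, h⟩
  · rintro (h | ⟨p, hp, h⟩)
    · exact ⟨q, Or.inl rfl, h⟩
    · exact ⟨p, Or.inr hp, h⟩

lemma in_ranges_iff (x : Int) (ranges : List (Int × Int × Int)) :
    in_ranges x ranges = true ↔ ∃ r ∈ ranges, r.1 ≤ x ∧ x ≤ r.2.1 := by
  induction ranges with
  | nil => simp [in_ranges]
  | cons r rest ih =>
    obtain ⟨s, e, w⟩ := r
    by_cases h : s ≤ x ∧ x ≤ e
    · simp [in_ranges, h]
    · simp only [in_ranges, if_neg h, ih]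
      constructor
      · rintro ⟨p, hp, hc⟩; exact ⟨p, List.mem_cons_of_mem _ hp, hc⟩
      · rintro ⟨p, hp, hc⟩
        rcases List.mem_cons.mp hp with rfl | hp'
        · exact absurd hc h
        · exact ⟨p, hp', hc⟩

lemma probe_inner_eq (a : Int) (ranges : List (Int × Int × Int)) (out : PySem.Set Int)
    (cs : List Int) :
    probe_inner a ranges out cs =
      if cs.any (fun c => in_ranges c ranges) then PySem.Set.add out a else out := by
  induction cs with
  | nil => simp [probe_inner]
  | cons c rest ih =>
    by_cases h : in_ranges c ranges = true <;> simp [probe_inner, h, ih]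

lemma any_candidates (a rb bg : Int) (p : Int → Bool) :
    (candidate_addrs a rb bg).any p =
      if a ≥ bg then p a || p (a - bg) || p (rb + (a - bg))
      else p a || p (rb + a) || p (bg + a) := by
  unfold candidate_addrs
  split <;>
  · rw [Bool.eq_iff_iff]
    simp only [List.any_eq_true, PySem.Set.mem_add, PySem.Set.mem_ofList,
      List.mem_singleton, Bool.or_eq_true]
    constructor
    · rintro ⟨c, ((h | h) | h), hp⟩ <;> subst h <;> tauto
    · rintro ((h | h) | h) <;> exact ⟨_, by tauto, h⟩

lemma merge_fold (ss : List (Int × Int × Int)) :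
    ∀ (acc : List (Int × Int)),
    ss.Pairwise (fun a b => a.1 ≤ b.1) →
    (∀ p ∈ acc.head?, ∀ r ∈ ss, p.1 ≤ r.1) →
    acc.Pairwise RP →
    (ss.foldl mergeStep acc).Pairwise RP ∧
    (∀ x, covP (ss.foldl mergeStep acc) x ↔ covP acc x ∨ ∃ r ∈ ss, r.1 ≤ x ∧ x ≤ r.2.1) := by
  induction ss with
  | nil => intro acc _ _ hp; simpa [covP] using hp
  | cons r ss ih =>
    intro acc hs hhead hp
    obtain ⟨hr, hs'⟩ := List.pairwise_cons.mp hs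
    have key : (mergeStep acc r).Pairwise RP ∧
        (∀ p ∈ (mergeStep acc r).head?, ∀ r' ∈ ss, p.1 ≤ r'.1) ∧
        (∀ x, covP (mergeStep acc r) x ↔ covP acc x ∨ (r.1 ≤ x ∧ x ≤ r.2.1)) := by
      match acc with
      | [] =>
        refine ⟨List.pairwise_singleton _ _, ?_, ?_⟩
        · intro p hp' r' hr'; simp [mergeStep] at hp'; subst hp'; exact hr r' hr'
        · intro x; simp [mergeStep, covP]
      | (ms, me) :: rest =>
        have hms : ms ≤ r.1 := hhead (ms, me) rfl r (List.mem_cons_self)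
        obtain ⟨hrp1, hrp2⟩ := List.pairwise_cons.mp hp
        by_cases hle : r.1 ≤ me
        · by_cases hext : me < r.2.1
          · have heq : mergeStep ((ms, me) :: rest) r = (ms, r.2.1) :: rest := by
              simp [mergeStep, hle, hext]
            rw [heq]
            refine ⟨List.pairwise_cons.mpr ⟨fun b hb => ?_, hrp2⟩, ?_, ?_⟩
            · exact hrp1 b hb
            · intro p hp' r' hr'; simp at hp'; subst hp'
              exact le_trans hms (hr r' hr')
            · intro x
              rw [covP_cons, covP_cons]
              constructor
              · rintro (⟨h1, h2⟩ | h)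
                · by_cases hxm : x ≤ me
                  · exact Or.inl (Or.inl ⟨h1, hxm⟩)
                  · exact Or.inr ⟨by omega, h2⟩
                · exact Or.inl (Or.inr h)
              · rintro ((⟨h1, h2⟩ | h) | ⟨h1, h2⟩)
                · exact Or.inl ⟨h1, by omega⟩
                · exact Or.inr h
                · exact Or.inl ⟨by omega, h2⟩
          · have heq : mergeStep ((ms, me) :: rest) r = (ms, me) :: rest := by
              simp [mergeStep, hle, hext]
            rw [heq]
            refine ⟨hp, ?_, ?_⟩
            · intro p hp' r' hr'; simp at hp'; subst hp'
              exact le_trans hms (hr r' hr')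
            · intro x
              rw [covP_cons]
              constructor
              · rintro (h | h)
                · exact Or.inl (Or.inl h)
                · exact Or.inl (Or.inr h)
              · rintro ((h | h) | ⟨h1, h2⟩)
                · exact Or.inl h
                · exact Or.inr h
                · exact Or.inl ⟨by omega, by omega⟩
        · have heq : mergeStep ((ms, me) :: rest) r = (r.1, r.2.1) :: (ms, me) :: rest := by
            simp [mergeStep, hle]
          rw [heq]
          refine ⟨?_, ?_, ?_⟩
          · refine List.pairwise_cons.mpr ⟨?_, hp⟩
            intro b hb
            rcases List.mem_cons.mp hb with rfl | hb'
            · exact ⟨by omega, hms⟩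
            · obtain ⟨h1, h2⟩ := hrp1 b hb'
              exact ⟨by omega, by omega⟩
          · intro p hp' r' hr'; simp at hp'; subst hp'
            exact hr r' hr'
          · intro x
            rw [covP_cons]
            tauto
    obtain ⟨k1, k2, k3⟩ := key
    obtain ⟨g1, g2⟩ := ih (mergeStep acc r) hs' k2 k1
    refine ⟨by simpa using g1, ?_⟩
    intro x
    rw [List.foldl_cons, g2 x, k3 x]
    simp only [List.mem_cons]
    constructor
    · rintro ((h | h) | ⟨r', hr', h⟩)
      · exact Or.inl h
      · exact Or.inr ⟨r, Or.inl rfl, h⟩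
      · exact Or.inr ⟨r', Or.inr hr', h⟩
    · rintro (h | ⟨r', (rfl | hr'), h⟩)
      · exact Or.inl (Or.inl h)
      · exact Or.inl (Or.inr h)
      · exact Or.inr ⟨r', hr', h⟩

lemma getD_mono_of_pairwise (l : List Int) (h : l.Pairwise (· ≤ ·)) :
    ∀ i j : Nat, i ≤ j → j < l.length → l.getD i 0 ≤ l.getD j 0 := by
  intro i j hij hj
  rcases Nat.eq_or_lt_of_le hij with rfl | hlt
  · exact le_refl _
  · rw [List.getD_eq_getElem _ _ (lt_of_le_of_lt hij hj), List.getD_eq_getElem _ _ hj]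
    exact List.pairwise_iff_getElem.mp h i j _ _ hlt

lemma bsLoop_spec (starts : List Int) (x : Int)
    (hmono : ∀ i j : Nat, i ≤ j → j < starts.length → starts.getD i 0 ≤ starts.getD j 0)
    (lo hi : Nat) (hlh : lo ≤ hi) (hhn : hi ≤ starts.length)
    (hlo : ∀ i, i < lo → starts.getD i 0 ≤ x)
    (hhi : ∀ i, hi ≤ i → i < starts.length → x < starts.getD i 0) :
    bsLoop starts x lo hi ≤ starts.length ∧
    (∀ i, i < bsLoop starts x lo hi → starts.getD i 0 ≤ x) ∧
    (∀ i, bsLoop starts x lo hi ≤ i → i < starts.length → x < starts.getD i 0) := by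
  rw [bsLoop]
  split
  · rename_i hlt
    split
    · rename_i hmid
      exact bsLoop_spec starts x hmono ((lo + hi) / 2 + 1) hi (by omega) hhn
        (fun i hi' => le_trans (hmono i ((lo + hi) / 2) (by omega) (by omega)) hmid) hhi
    · rename_i hmid
      rw [not_le] at hmid
      exact bsLoop_spec starts x hmono lo ((lo + hi) / 2) (by omega) (by omega) hlo
        (fun i h1 h2 => lt_of_lt_of_le hmid (hmono ((lo + hi) / 2) i h1 h2))
  · rename_i h
    exact ⟨by omega, hlo, fun i h1 h2 => hhi i (by omega) h2⟩
termination_by hi - lo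
decreasing_by all_goals omega

lemma hitMerged_iff (merged : List (Int × Int)) (x : Int)
    (hp : merged.Pairwise (fun a b => a.2 < b.1 ∧ a.1 ≤ b.1)) :
    hitMerged merged x = true ↔ covP merged x := by
  have hpf : (merged.map Prod.fst).Pairwise (· ≤ ·) :=
    List.Pairwise.map _ (fun a b h => h.2) hp
  have hmono := getD_mono_of_pairwise _ hpf
  obtain ⟨hle, hlt, hgt⟩ := bsLoop_spec (merged.map Prod.fst) x hmono 0 merged.length
    (Nat.zero_le _) (by simp) (by omega)
    (fun i h1 h2 => absurd h2 (by simp; omega))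
  rw [List.length_map] at hle
  simp only [hitMerged, Bool.and_eq_true, decide_eq_true_eq]
  constructor
  · rintro ⟨h0, hx⟩
    set r := bsLoop (merged.map Prod.fst) x 0 merged.length with hr
    have hrn : r - 1 < merged.length := by omega
    have hs : merged[r - 1].1 ≤ x := by
      have := hlt (r - 1) (by omega)
      rwa [List.getD_eq_getElem _ _ (by simpa using hrn), List.getElem_map] at this
    have he : x ≤ merged[r - 1].2 := by
      rwa [List.getD_eq_getElem _ _ (by simpa using hrn), List.getElem_map] at hx
    exact ⟨merged[r - 1], List.getElem_mem hrn, hs, he⟩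
  · rintro ⟨p, hmem, hpx, hxe⟩
    set r := bsLoop (merged.map Prod.fst) x 0 merged.length with hr
    obtain ⟨j, hj, hjp⟩ := List.mem_iff_getElem.mp hmem
    have hjr : j < r := by
      by_contra hc
      have := hgt j (by omega) (by simpa using hj)
      rw [List.getD_eq_getElem _ _ (by simpa using hj), List.getElem_map, hjp] at this
      omega
    have h0 : 0 < r := by omega
    have hrn : r - 1 < merged.length := by omega
    refine ⟨h0, ?_⟩
    have hs1 : merged[r - 1].1 ≤ x := by
      have := hlt (r - 1) (by omega)
      rwa [List.getD_eq_getElem _ _ (by simpa using hrn), List.getElem_map] at this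
    rw [List.getD_eq_getElem _ _ (by simpa using hrn), List.getElem_map]
    rcases Nat.lt_or_ge j (r - 1) with hlt' | hge
    · have := List.pairwise_iff_getElem.mp hp j (r - 1) hj hrn hlt'
      rw [hjp] at this
      omega
    · have : j = r - 1 := by omega
      subst this
      rw [hjp]
      exact hxe

lemma hitMerged_eq_in_ranges (ranges : List (Int × Int × Int)) (x : Int) :
    hitMerged (mergeRanges ranges) x = in_ranges x ranges := by
  obtain ⟨hpw, hcov⟩ := merge_fold (PySem.List.sorted ranges (fun r => r.1) false) []
    (PySem.List.sorted_pairwise ranges (fun r => r.1))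
    (by simp) List.Pairwise.nil
  have hprev : (mergeRanges ranges).Pairwise (fun a b => a.2 < b.1 ∧ a.1 ≤ b.1) := by
    unfold mergeRanges
    exact List.pairwise_reverse.mpr hpw
  rw [Bool.eq_iff_iff, hitMerged_iff _ _ hprev, in_ranges_iff]
  have hcr : covP (mergeRanges ranges) x ↔
      covP ((PySem.List.sorted ranges (fun r => r.1) false).foldl mergeStep []) x := by
    unfold mergeRanges covP
    simp
  rw [hcr, hcov x]
  simp only [covP, List.not_mem_nil, false_and, exists_const, false_or]
  constructor
  · rintro ⟨r, hr, h⟩; exact ⟨r, (PySem.List.mem_sorted _ _ _ _).mp hr, h⟩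
  · rintro ⟨r, hr, h⟩; exact ⟨r, (PySem.List.mem_sorted _ _ _ _).mpr hr, h⟩

-- ===== VERDICT (by name: the statement is the Claim_ definition above) =====
theorem executed_probe_set_spec : Claim_equal_executed_probe_set := by
  intro probes ranges runtime_base base_guess _
  unfold Spec_executed_probe_set executed_probe_set executed_probe_set_alt
  have hf : (fun (out : PySem.Set Int) (a : Int) =>
        probe_inner a ranges out (candidate_addrs a runtime_base base_guess)) =
      (fun (out : PySem.Set Int) (a : Int) =>
        let cs : Int × Int × Int :=
          if a ≥ base_guess then (a, a - base_guess, runtime_base + (a - base_guess))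
          else (a, runtime_base + a, base_guess + a)
        if hitMerged (mergeRanges ranges) cs.1 || hitMerged (mergeRanges ranges) cs.2.1 ||
            hitMerged (mergeRanges ranges) cs.2.2 then
          PySem.Set.add out a
        else out) := by
    funext out a
    rw [probe_inner_eq, any_candidates a runtime_base base_guess (fun c => in_ranges c ranges)]
    by_cases hbg : a ≥ base_guess <;>
      simp [hbg, hitMerged_eq_in_ranges]
  rw [hf]
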